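-- pv_equiv track=rewrite | github.com/ylqweqwe/swagger-fuzz | swagger-api-full.py | generate_path_variants
-- ===== SOURCE A (Python) =====
-- MAX_DEPTH = 3
--
-- PATH_SUFFIXES = [
--     "/a/../",
--     "/a/..;/",
--     "/.;/"
-- ]
--
-- def generate_path_variants(base_path):
--
--     variants = [base_path]
--
--     def recurse(current_paths, depth):
--         if depth >= MAX_DEPTH:
--             return
--         new_paths = []
--         for path in current_paths:
--             for suffix in PATH_SUFFIXES:
--                 new_path = path + suffix
--                 new_paths.append(new_path)
--                 variants.append(new_path)
--         recurse(new_paths, depth + 1)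
--
--     recurse([base_path], 1)
--     return list(set(variants))
-- ===== SOURCE B (Python) =====
-- MAX_DEPTH = 3
--
-- PATH_SUFFIXES = [
--     "/a/../",
--     "/a/..;/",
--     "/.;/"
-- ]
--
-- def generate_path_variants(base_path):
--     # Direct enumeration: the recursion in A produces exactly all suffix
--     # sequences of length 1 and 2 (depths 1..MAX_DEPTH-1) appended to base_path.
--     variants = [base_path]
--     variants += [base_path + s for s in PATH_SUFFIXES]
--     variants += [base_path + s1 + s2 for s1 in PATH_SUFFIXES for s2 in PATH_SUFFIXES]
--     return list(set(variants))
-- ===== Notes on version B (the rewrite author's own statement) =====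
-- stated objective: simpler
-- what changed: Replaced the nested recursion with mutated closure state by two direct list comprehensions that enumerate the length-1 and length-2 suffix sequences explicitly.
import Mathlib
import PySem

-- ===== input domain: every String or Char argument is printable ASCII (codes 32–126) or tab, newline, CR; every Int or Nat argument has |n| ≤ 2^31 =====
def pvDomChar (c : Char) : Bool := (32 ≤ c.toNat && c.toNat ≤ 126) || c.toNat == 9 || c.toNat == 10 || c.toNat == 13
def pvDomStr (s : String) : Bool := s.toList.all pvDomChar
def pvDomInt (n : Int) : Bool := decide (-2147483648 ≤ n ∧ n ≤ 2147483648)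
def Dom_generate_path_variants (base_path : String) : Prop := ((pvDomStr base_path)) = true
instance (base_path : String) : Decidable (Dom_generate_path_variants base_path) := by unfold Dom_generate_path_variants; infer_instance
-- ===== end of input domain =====

-- B replaces A's closure-mutating recursion by two direct comprehensions enumerating
-- the length-1 and length-2 suffix sequences (same value, simpler decomposition).
-- ===== PORT A =====
def pvMAX_DEPTH : Int := 3

def pvPATH_SUFFIXES : List String := ["/a/../", "/a/..;/", "/.;/"]

-- inner function 'recurse': 'variants' (the mutated outer list) is threaded as state;
-- the two appends inside the double loop become a foldl over the pair (new_paths, variants)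
def pvRecurse (current_paths : List String) (depth : Int) (variants : List String) : List String :=
  if depth ≥ pvMAX_DEPTH then variants
  else
    let st := current_paths.foldl (fun (st : List String × List String) path =>
      pvPATH_SUFFIXES.foldl (fun st suffix =>
        let new_path := path ++ suffix
        (st.1 ++ [new_path], st.2 ++ [new_path])) st) ([], variants)
    pvRecurse st.1 (depth + 1) st.2
termination_by (pvMAX_DEPTH - depth).toNat
decreasing_by simp only [pvMAX_DEPTH] at *; omega

def generate_path_variants (base_path : String) : List String :=
  PySem.Set.ofList (pvRecurse [base_path] 1 [base_path])

-- ===== PORT B =====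
def generate_path_variants_alt (base_path : String) : List String :=
  let variants := [base_path]
  let variants := variants ++ pvPATH_SUFFIXES.map (fun s => base_path ++ s)
  let variants := variants ++
    pvPATH_SUFFIXES.flatMap (fun s1 => pvPATH_SUFFIXES.map (fun s2 => base_path ++ s1 ++ s2))
  PySem.Set.ofList variants

-- ===== PRECONDITION & SPEC =====
def Spec_generate_path_variants (base_path : String) (out : List String) : Prop := out = generate_path_variants_alt base_path
instance (base_path : String) (out : List String) : Decidable (Spec_generate_path_variants base_path out) := by unfold Spec_generate_path_variants; infer_instance

-- ===== CLAIM (what is proved, stated in full; the proofs are below) =====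
def Claim_equal_generate_path_variants : Prop := ∀ (base_path : String), Dom_generate_path_variants base_path → Spec_generate_path_variants base_path (generate_path_variants base_path)

-- ===== LEMMAS AND PROOFS =====

lemma pvRecurse_eval (b : String) :
    pvRecurse [b] 1 [b] =
      [b] ++ pvPATH_SUFFIXES.map (fun s => b ++ s) ++
        pvPATH_SUFFIXES.flatMap (fun s1 => pvPATH_SUFFIXES.map (fun s2 => b ++ s1 ++ s2)) := by
  rw [pvRecurse, pvRecurse, pvRecurse]
  simp [pvMAX_DEPTH, pvPATH_SUFFIXES]

-- ===== VERDICT (by name: the statement is the Claim_ definition above) =====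
theorem generate_path_variants_spec : Claim_equal_generate_path_variants := by
  intro b _
  show generate_path_variants b = generate_path_variants_alt b
  simp [generate_path_variants, generate_path_variants_alt, pvRecurse_eval]
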